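-- pv_equiv track=rewrite | github.com/jcolinpatrick/kryptos | src/kryptos/kernel/scoring/crib_diagnostic.py | _longest_contiguous
-- ===== SOURCE A (Python) =====
-- from typing import Dict, List, Optional, Tuple
--
-- def _longest_contiguous(positions: List[int]) -> int:
--     """Find longest contiguous run in a sorted list of positions."""
--     if not positions:
--         return 0
--     best = 1
--     current = 1
--     for i in range(1, len(positions)):
--         if positions[i] == positions[i - 1] + 1:
--             current += 1
--             best = max(best, current)
--         else:
--             current = 1
--     return best
-- ===== SOURCE B (Python) =====
-- def _longest_contiguous(positions):
--     """Find longest contiguous run in a sorted list of positions."""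
--     n = len(positions)
--     if n == 0:
--         return 0
--     # boundaries of the maximal runs: 0, every index that breaks the +1 chain, and n
--     bounds = [0] + [i for i in range(1, n) if positions[i] != positions[i - 1] + 1] + [n]
--     # each pair of adjacent boundaries delimits one maximal run; answer = widest one
--     return max(b - a for a, b in zip(bounds, bounds[1:]))
-- ===== Notes on version B (the rewrite author's own statement) =====
-- stated objective: alternative
-- what changed: Instead of scanning with best/current counters, B first builds the list of run boundaries (0, every chain-breaking index, n) with a comprehension and then returns the maximum gap between adjacent boundaries via zip; what is maintained is a boundary list, not a running counter.
import Mathlib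
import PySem

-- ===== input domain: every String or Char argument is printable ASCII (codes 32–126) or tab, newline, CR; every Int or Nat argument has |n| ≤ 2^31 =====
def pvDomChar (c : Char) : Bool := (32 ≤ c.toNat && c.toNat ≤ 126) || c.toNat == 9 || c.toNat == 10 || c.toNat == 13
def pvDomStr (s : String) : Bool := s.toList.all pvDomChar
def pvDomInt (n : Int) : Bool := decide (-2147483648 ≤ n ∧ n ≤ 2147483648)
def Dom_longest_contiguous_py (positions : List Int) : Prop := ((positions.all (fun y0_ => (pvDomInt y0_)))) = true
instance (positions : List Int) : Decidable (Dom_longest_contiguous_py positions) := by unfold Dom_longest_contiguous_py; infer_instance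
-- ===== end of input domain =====

-- B replaces A's best/current counter scan by building the list of run boundaries (0, every chain-breaking index, n) and returning the maximum gap between adjacent boundaries (alternative decomposition, same cost).

-- ===== PORT A =====
def longest_contiguous_py (positions : List Int) : Int :=
  if positions = [] then 0
  else
    ((PySem.List.pyRange 1 positions.length 1).foldl
      (fun (s : Int × Int) i =>
        if PySem.List.pyGetD positions i 0 = PySem.List.pyGetD positions (i - 1) 0 + 1 then
          (max s.1 (s.2 + 1), s.2 + 1)   -- current += 1; best = max(best, current)
        else (s.1, 1))
      (1, 1)).1   -- state = (best, current)

-- ===== PORT B =====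
def longest_contiguous_py_alt (positions : List Int) : Int :=
  let n : Int := positions.length
  if n = 0 then 0
  else
    -- bounds = [0] + [i for i in range(1, n) if positions[i] != positions[i-1] + 1] + [n]
    let bounds : List Int :=
      0 :: ((PySem.List.pyRange 1 positions.length 1).filter
        (fun i => PySem.List.pyGetD positions i 0 != PySem.List.pyGetD positions (i - 1) 0 + 1) ++ [n])
    -- max(b - a for a, b in zip(bounds, bounds[1:])); bounds has ≥ 2 elements so the
    -- generator is nonempty and Python's max returns: getD's default is never used
    (PySem.List.max? (((bounds.zip bounds.tail).map (fun ab => ab.2 - ab.1))) (fun y => y)).getD 0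

-- ===== PRECONDITION & SPEC =====
def Spec_longest_contiguous_py (positions : List Int) (out : Int) : Prop := out = longest_contiguous_py_alt positions
instance (positions : List Int) (out : Int) : Decidable (Spec_longest_contiguous_py positions out) := by unfold Spec_longest_contiguous_py; infer_instance

-- ===== CLAIM (what is proved, stated in full; the proofs are below) =====
def Claim_equal_longest_contiguous_py : Prop := ∀ (positions : List Int), Dom_longest_contiguous_py positions → Spec_longest_contiguous_py positions (longest_contiguous_py positions)

-- ===== LEMMAS AND PROOFS =====

-- length of the maximal contiguous run starting at prev and continuing into rest (reference function)
def pvRunLen (prev : Int) (rest : List Int) : Int :=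
  match rest with
  | x :: xs => if x = prev + 1 then 1 + pvRunLen x xs else 1
  | [] => 1

lemma pvRunLen_pos (prev : Int) (rest : List Int) : 1 ≤ pvRunLen prev rest := by
  cases rest with
  | nil => simp [pvRunLen]
  | cons x xs =>
    simp only [pvRunLen]
    split
    · have := pvRunLen_pos x xs; omega
    · omega

-- reference recursion: peel off the first maximal run, recurse on the rest
def pvPeel : List Int → Int
  | [] => 0
  | p :: rest =>
    max (pvRunLen p rest) (pvPeel ((p :: rest).drop (pvRunLen p rest).toNat))
termination_by xs => xs.length
decreasing_by
  have := pvRunLen_pos p rest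
  simp only [List.length_drop, List.length_cons]
  omega

lemma pvPeel_nonneg (xs : List Int) : 0 ≤ pvPeel xs := by
  cases xs with
  | nil => simp [pvPeel]
  | cons p rest =>
    rw [pvPeel]
    have := pvRunLen_pos p rest
    omega

-- ===== A side: A's fold computes pvPeel =====

-- structural view of A's loop body: left fold over the tail, carrying the previous element
def lcA (prev : Int) (s : Int × Int) : List Int → Int × Int
  | [] => s
  | x :: xs => lcA x (if x = prev + 1 then (max s.1 (s.2 + 1), s.2 + 1) else (s.1, 1)) xs

-- A's index fold over range(k, len) equals the structural fold on the dropped suffix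
lemma foldA_conv (full : List Int) : ∀ (k : Nat), 1 ≤ k → ∀ (s : Int × Int),
    (PySem.List.pyRange k full.length 1).foldl
      (fun (s : Int × Int) i =>
        if PySem.List.pyGetD full i 0 = PySem.List.pyGetD full (i - 1) 0 + 1 then
          (max s.1 (s.2 + 1), s.2 + 1)
        else (s.1, 1)) s
    = lcA (full.getD (k - 1) 0) s (full.drop k) := by
  intro k hk s
  induction hm : full.length - k generalizing k s with
  | zero =>
    have hle : ((full.length : Nat) : Int) ≤ ((k : Nat) : Int) := by exact_mod_cast (by omega : full.length ≤ k)
    rw [PySem.List.pyRange_one_eq_nil hle, List.drop_eq_nil_of_le (by omega)]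
    simp [lcA]
  | succ n ih =>
    have hklt : k < full.length := by omega
    rw [PySem.List.pyRange_one_cons (by exact_mod_cast hklt), List.foldl_cons]
    have hk1 : ((k : Nat) : Int) - 1 = ((k - 1 : Nat) : Int) := by omega
    rw [hk1]
    simp only [PySem.List.pyGetD_natCast]
    have hsucc : ((k : Nat) : Int) + 1 = ((k + 1 : Nat) : Int) := by push_cast; ring
    rw [hsucc, ih (k + 1) (by omega) _ (by omega)]
    rw [List.drop_eq_getElem_cons hklt]
    simp only [Nat.add_sub_cancel, lcA, List.getD_eq_getElem _ _ hklt]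

-- the structural fold's best equals the peel recursion's answer, relative to the running state
lemma lcA_spec : ∀ (rest : List Int) (p best cur : Int), 1 ≤ cur → cur ≤ best →
    (lcA p (best, cur) rest).1
      = max best (max (cur - 1 + pvRunLen p rest)
          (pvPeel ((p :: rest).drop (pvRunLen p rest).toNat))) := by
  intro rest
  induction rest with
  | nil =>
    intro p best cur h1 h2
    simp [lcA, pvRunLen, pvPeel]
    omega
  | cons x xs ih =>
    intro p best cur h1 h2
    have hL := pvRunLen_pos x xs
    by_cases hx : x = p + 1
    · simp only [lcA, if_pos hx]
      rw [ih x (max best (cur + 1)) (cur + 1) (by omega) (by omega)]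
      simp only [pvRunLen, if_pos hx]
      have ht : (1 + pvRunLen x xs).toNat = (pvRunLen x xs).toNat + 1 := by omega
      rw [ht, List.drop_succ_cons]
      omega
    · simp only [lcA, if_neg hx]
      rw [ih x best 1 (by omega) (by omega)]
      simp only [pvRunLen, if_neg hx]
      have h3 : pvPeel (x :: xs)
          = max (pvRunLen x xs) (pvPeel ((x :: xs).drop (pvRunLen x xs).toNat)) := by
        rw [pvPeel]
      simp only [Int.toNat_one, List.drop_succ_cons, List.drop_zero]
      omega

-- ===== B side: max gap between adjacent boundaries computes pvPeel =====

-- reference: maximum gap between adjacent elements of prev :: l ++ [last]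
def pvGaps (prev : Int) (l : List Int) (last : Int) : Int :=
  match l with
  | [] => last - prev
  | x :: xs => max (x - prev) (pvGaps x xs last)

-- the successive-differences list of prev :: l ++ [last]
def pvGapsList (prev : Int) (l : List Int) (last : Int) : List Int :=
  match l with
  | [] => [last - prev]
  | x :: xs => (x - prev) :: pvGapsList x xs last

lemma pvZipGaps (l : List Int) : ∀ (prev last : Int),
    (((prev :: (l ++ [last])).zip ((prev :: (l ++ [last])).tail)).map (fun ab => ab.2 - ab.1))
      = pvGapsList prev l last := by
  induction l with
  | nil => intro prev last; simp [pvGapsList]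
  | cons x xs ih =>
    intro prev last
    have h := ih x last
    simp only [List.cons_append, List.tail_cons] at h ⊢
    simp only [List.zip_cons_cons, List.map_cons, pvGapsList]
    exact congrArg (fun t => (x - prev) :: t) h

lemma pvFoldlMax (t : List Int) : ∀ (a b : Int), t.foldl max (max a b) = max a (t.foldl max b) := by
  induction t with
  | nil => intro a b; simp
  | cons y ys ih =>
    intro a b
    simp only [List.foldl_cons]
    rw [show max (max a b) y = max a (max b y) from by omega, ih]

lemma pvMaxGapsList : ∀ (l : List Int) (prev last : Int),
    (PySem.List.max? (pvGapsList prev l last) (fun y => y)).getD 0 = pvGaps prev l last := by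
  intro l
  induction l with
  | nil =>
    intro prev last
    show (PySem.List.max? [last - prev] (fun y => y)).getD 0 = last - prev
    rw [PySem.List.max?_id_cons]
    simp
  | cons x xs ih =>
    intro prev last
    obtain ⟨g0, gt, hG⟩ : ∃ g0 gt, pvGapsList x xs last = g0 :: gt := by
      cases xs <;> exact ⟨_, _, rfl⟩
    have hih := ih x last
    rw [hG, PySem.List.max?_id_cons] at hih
    simp only [Option.getD_some] at hih
    show (PySem.List.max? ((x - prev) :: pvGapsList x xs last) (fun y => y)).getD 0
        = max (x - prev) (pvGaps x xs last)
    rw [hG, PySem.List.max?_id_cons]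
    simp only [Option.getD_some, List.foldl_cons]
    rw [pvFoldlMax, hih]

-- the boundary list of the suffix starting at index k-1 yields its peel value, relative to prev
lemma pvBreaks_conv (full : List Int) : ∀ (k : Nat) (prev : Int), 1 ≤ k → k ≤ full.length →
    prev ≤ (k : Int) - 1 →
    pvGaps prev
      ((PySem.List.pyRange k full.length 1).filter
        (fun i => PySem.List.pyGetD full i 0 != PySem.List.pyGetD full (i - 1) 0 + 1))
      (full.length)
    = max (((k : Int) - 1 - prev) + pvRunLen (full.getD (k - 1) 0) (full.drop k))
        (pvPeel (full.drop ((k - 1) + (pvRunLen (full.getD (k - 1) 0) (full.drop k)).toNat))) := by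
  intro k prev hk hkle hprev
  induction hm : full.length - k generalizing k prev with
  | zero =>
    have hkeq : k = full.length := by omega
    have hle : ((full.length : Nat) : Int) ≤ ((k : Nat) : Int) := by exact_mod_cast (by omega : full.length ≤ k)
    have hdrop : List.drop k full = [] := by rw [hkeq, List.drop_length]
    have hdrop2 : List.drop ((k - 1) + (1 : Int).toNat) full = [] := by
      rw [show (k - 1) + (1 : Int).toNat = k from by omega, hdrop]
    rw [PySem.List.pyRange_one_eq_nil hle, hdrop]
    simp only [List.filter_nil, pvGaps, pvRunLen]
    rw [hdrop2]
    simp only [pvPeel]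
    omega
  | succ n ih =>
    have hklt : k < full.length := by omega
    rw [PySem.List.pyRange_one_cons (by exact_mod_cast hklt), List.filter_cons]
    have hk1 : ((k : Nat) : Int) - 1 = ((k - 1 : Nat) : Int) := by omega
    have hsucc : ((k : Nat) : Int) + 1 = ((k + 1 : Nat) : Int) := by push_cast; ring
    simp only [hk1, PySem.List.pyGetD_natCast]
    have hdropk : full.drop k = full.getD k 0 :: full.drop (k + 1) := by
      rw [List.drop_eq_getElem_cons hklt, List.getD_eq_getElem full 0 hklt]
    set L' := pvRunLen (full.getD k 0) (full.drop (k + 1)) with hL'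
    have hL'1 : 1 ≤ L' := pvRunLen_pos _ _
    have hpeelk : pvPeel (full.drop k) = max L' (pvPeel (full.drop (k + L'.toNat))) := by
      rw [hdropk, pvPeel, ← hL', ← hdropk, List.drop_drop]
    by_cases hbrk : full.getD k 0 = full.getD (k - 1) 0 + 1
    · -- no break at k: run continues
      rw [if_neg (show ¬ ((full.getD k 0 != full.getD (k - 1) 0 + 1) = true) from by
        simp only [bne_iff_ne, ne_eq, not_not]; exact hbrk)]
      have hih := ih (k + 1) prev (by omega) (by omega) (by push_cast; omega) (by omega)
      simp only [Nat.add_sub_cancel] at hih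
      rw [← hL'] at hih
      rw [hsucc]
      rw [hih]
      have hrun : pvRunLen (full.getD (k - 1) 0) (full.drop k) = 1 + L' := by
        rw [hdropk, pvRunLen, if_pos hbrk, ← hL']
      rw [hrun]
      have hdr : (k - 1) + ((1 : Int) + L').toNat = k + L'.toNat := by omega
      rw [hdr]
      omega
    · -- break at k
      rw [if_pos (show (full.getD k 0 != full.getD (k - 1) 0 + 1) = true from by
        simp only [bne_iff_ne, ne_eq]; exact hbrk)]
      have hih := ih (k + 1) (k : Int) (by omega) (by omega) (by push_cast; omega) (by omega)
      simp only [Nat.add_sub_cancel] at hih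
      rw [← hL'] at hih
      show max ((k : Int) - prev)
          (pvGaps (k : Int)
            ((PySem.List.pyRange ((k : Int) + 1) full.length 1).filter
              (fun i => PySem.List.pyGetD full i 0 != PySem.List.pyGetD full (i - 1) 0 + 1))
            (full.length)) = _
      rw [hsucc]
      rw [hih]
      have hrun : pvRunLen (full.getD (k - 1) 0) (full.drop k) = 1 := by
        rw [hdropk, pvRunLen, if_neg hbrk]
      rw [hrun]
      rw [show (k - 1) + (1 : Int).toNat = k from by omega]
      rw [hpeelk]
      have := pvPeel_nonneg (full.drop (k + L'.toNat))
      omega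

-- ===== VERDICT (by name: the statement is the Claim_ definition above) =====
theorem longest_contiguous_py_spec : Claim_equal_longest_contiguous_py := by
  intro positions _
  unfold Spec_longest_contiguous_py
  cases hpos : positions with
  | nil =>
    simp [longest_contiguous_py, longest_contiguous_py_alt]
  | cons p rest =>
    -- B side: alt = pvPeel (p :: rest)
    have hB : longest_contiguous_py_alt (p :: rest) = pvPeel (p :: rest) := by
      simp only [longest_contiguous_py_alt]
      rw [if_neg (show ¬ ((((p :: rest).length : Nat) : Int) = 0) from by simp; omega)]
      rw [pvZipGaps, pvMaxGapsList]
      have hc := pvBreaks_conv (p :: rest) 1 0 (by omega) (by simp) (by omega)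
      simp only [Nat.cast_one, Nat.sub_self, Nat.zero_add, List.getD_cons_zero,
        List.drop_one, List.tail_cons] at hc
      rw [hc]
      have hpeel : pvPeel (p :: rest)
          = max (pvRunLen p rest) (pvPeel ((p :: rest).drop (pvRunLen p rest).toNat)) := by
        rw [pvPeel]
      have h1 := pvRunLen_pos p rest
      have h2 := pvPeel_nonneg ((p :: rest).drop (pvRunLen p rest).toNat)
      omega
    rw [hB]
    -- A side: A = pvPeel (p :: rest)
    rw [longest_contiguous_py, if_neg (by simp)]
    have hc := foldA_conv (p :: rest) 1 (by omega) (1, 1)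
    simp only [List.length_cons, Nat.cast_one] at hc ⊢
    rw [hc]
    simp only [Nat.sub_self, List.getD_cons_zero, List.drop_one, List.tail_cons]
    rw [lcA_spec rest p 1 1 (by omega) (by omega)]
    have hpeel : pvPeel (p :: rest)
        = max (pvRunLen p rest) (pvPeel ((p :: rest).drop (pvRunLen p rest).toNat)) := by
      rw [pvPeel]
    have h1 := pvRunLen_pos p rest
    have h2 := pvPeel_nonneg ((p :: rest).drop (pvRunLen p rest).toNat)
    omega
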